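-- pv_equiv track=rewrite | github.com/adilamanmohammed/FLT_Assignment5 | prog5.py | discardUnreachableProductions
-- ===== SOURCE A (Python) =====
-- def discardUnreachableProductions(grammar_rules, start_symbol):
--     #Only start symbol is reachable initially
--     reachable = {start_symbol}
--     #We'll store and update the list of newly found reachable symbols here
--     newly_reachable = [start_symbol]
--
--     #Keep searching until no new reachable symbols are found in an iteration
--     while newly_reachable:
--         current_symbol = newly_reachable.pop()
--         #Check the productions of the current reachable symbol
--         if current_symbol in grammar_rules:
--             for production in grammar_rules[current_symbol]:
--                 for symbol in production.split():
--                     #If we find a new reachable symbol, add it to the list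
--                     if symbol not in reachable:
--                         reachable.add(symbol)
--                         newly_reachable.append(symbol)
--
--     #Filtering out unreachable productions
--     filtered_grammar = {key: value for key, value in grammar_rules.items() if key in reachable}
--     return filtered_grammar
-- ===== SOURCE B (Python) =====
-- def discardUnreachableProductions(grammar_rules, start_symbol):
--     # Bounded fixpoint iteration: len(grammar_rules) full passes over the rule
--     # table always reach the closure (each productive pass adds at least one
--     # new reachable rule key, and there are at most len(grammar_rules) keys).
--     reachable = {start_symbol}
--     for _ in range(len(grammar_rules)):
--         for key, productions in grammar_rules.items():
--             if key in reachable: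
--                 for production in productions:
--                     reachable.update(production.split())
--     return {key: value for key, value in grammar_rules.items() if key in reachable}
-- ===== Notes on version B (the rewrite author's own statement) =====
-- stated objective: alternative
-- what changed: Replaces the LIFO worklist (pop newly-found symbols one by one) with a bounded repeated-full-scan fixpoint: len(grammar_rules) whole passes over the rule table, adding all symbols produced by already-reachable keys; output is the same order-independent reachable-key filter. (Pre_ excludes duplicate-key association lists, impossible for a Python dict, where the two Lean ports' first-match vs every-entry readings could differ; in Python the dict collapses duplicates and both agree.)
import Mathlib
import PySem

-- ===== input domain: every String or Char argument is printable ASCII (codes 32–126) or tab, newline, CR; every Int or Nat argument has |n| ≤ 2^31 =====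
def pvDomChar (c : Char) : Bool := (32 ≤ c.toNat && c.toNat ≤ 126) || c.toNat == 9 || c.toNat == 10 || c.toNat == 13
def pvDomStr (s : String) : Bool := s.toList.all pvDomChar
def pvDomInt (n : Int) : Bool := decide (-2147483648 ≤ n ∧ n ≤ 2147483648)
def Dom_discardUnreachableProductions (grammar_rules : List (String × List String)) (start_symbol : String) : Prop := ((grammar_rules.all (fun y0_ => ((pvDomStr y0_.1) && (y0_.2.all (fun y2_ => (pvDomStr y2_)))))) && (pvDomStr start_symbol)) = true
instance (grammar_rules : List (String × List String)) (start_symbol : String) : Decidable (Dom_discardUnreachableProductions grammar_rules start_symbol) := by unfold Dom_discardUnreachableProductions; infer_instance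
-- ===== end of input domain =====

-- B replaces A's LIFO worklist over newly-found symbols by a bounded repeated-full-scan
-- fixpoint (len(grammar_rules) whole passes); same return value (proved below for dicts,
-- i.e. association lists without duplicate keys).

-- ===== PORT A =====

-- 'production.split()' for every production, in order (the two nested for-loops' iteration)
def pvSyms (prods : List String) : List String := prods.flatMap (fun p => PySem.Str.split₀ p)

-- dict lookup on the association list: first match (= Python dict, which has unique keys)
def pvLookup : List (String × List String) → String → Option (List String)
  | [], _ => none
  | (k, v) :: rest, x => if k == x then some v else pvLookup rest x

-- the body of A's two inner for-loops: add each unseen symbol to reachable and append it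
-- to the worklist (reachable is a Python set built by membership-guarded adds, so it is a
-- duplicate-free list; the guarded append IS PySem.Set.add)
def pvAdd (reach newly : List String) (syms : List String) : List String × List String :=
  syms.foldl (fun st sym => if sym ∈ st.1 then st else (st.1 ++ [sym], st.2 ++ [sym])) (reach, newly)

-- all symbols occurring in any production (used only as the termination measure's universe)
def pvU (g : List (String × List String)) : List String :=
  PySem.Set.ofList (g.flatMap (fun kv => pvSyms kv.2))

theorem pvAdd_spec (syms : List String) (reach newly : List String) :
    ∃ t, pvAdd reach newly syms = (reach ++ t, newly ++ t) ∧ t.Nodup ∧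
      (∀ x, x ∈ t ↔ (x ∈ syms ∧ x ∉ reach)) := by
  induction syms generalizing reach newly with
  | nil => exact ⟨[], by simp [pvAdd], List.nodup_nil, by simp⟩
  | cons a rest ih =>
    by_cases ha : a ∈ reach
    · obtain ⟨t, h1, h2, h3⟩ := ih reach newly
      refine ⟨t, by simpa [pvAdd, ha] using h1, h2, fun x => ?_⟩
      rw [h3 x]
      constructor
      · rintro ⟨hx, hr⟩; exact ⟨List.mem_cons_of_mem _ hx, hr⟩
      · rintro ⟨hx, hr⟩
        rcases List.mem_cons.1 hx with rfl | hx
        · exact absurd ha hr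
        · exact ⟨hx, hr⟩
    · obtain ⟨t, h1, h2, h3⟩ := ih (reach ++ [a]) (newly ++ [a])
      have hstep : pvAdd reach newly (a :: rest) = pvAdd (reach ++ [a]) (newly ++ [a]) rest := by
        simp [pvAdd, ha]
      refine ⟨a :: t, ?_, ?_, fun x => ?_⟩
      · rw [hstep, h1]; simp
      · refine List.nodup_cons.2 ⟨fun hat => ?_, h2⟩
        have := ((h3 a).1 hat).2
        simp at this
      · constructor
        · intro hx
          rcases List.mem_cons.1 hx with rfl | hx
          · exact ⟨List.mem_cons_self, ha⟩
          · obtain ⟨hxr, hxn⟩ := (h3 x).1 hx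
            simp only [List.mem_append, List.mem_singleton, not_or] at hxn
            exact ⟨List.mem_cons_of_mem _ hxr, hxn.1⟩
        · rintro ⟨hx, hr⟩
          rcases List.mem_cons.1 hx with rfl | hx
          · exact List.mem_cons_self
          · by_cases hxa : x = a
            · exact hxa ▸ List.mem_cons_self
            · refine List.mem_cons_of_mem _ ((h3 x).2 ⟨hx, ?_⟩)
              simp [hr, hxa]

theorem pvCount1 (U reach : List String) (a : String) (hU : U.Nodup) (ha : a ∈ U) (har : a ∉ reach) :
    (U.filter (fun x => decide (x ∉ reach) && decide (x ≠ a))).length + 1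
      = (U.filter (fun x => decide (x ∉ reach))).length := by
  induction U with
  | nil => simp at ha
  | cons u rest ih =>
    rcases List.nodup_cons.1 hU with ⟨hu, hrest⟩
    by_cases hua : u = a
    · subst hua
      have hcongr : rest.filter (fun x => decide (x ∉ reach) && decide (x ≠ u))
          = rest.filter (fun x => decide (x ∉ reach)) := by
        refine List.filter_congr (fun x hx => ?_)
        have : x ≠ u := fun h => hu (h ▸ hx)
        simp [this]
      have hfu : (decide (u ∉ reach) && decide (u ≠ u)) = false := by simp
      have hgu : decide (u ∉ reach) = true := by simp [har]
      rw [List.filter_cons, List.filter_cons, hfu, hgu, hcongr]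
      simp
    · have ha' : a ∈ rest := by
        rcases List.mem_cons.1 ha with rfl | h
        · exact absurd rfl hua
        · exact h
      have ihr := ih hrest ha'
      by_cases hur : u ∈ reach
      · have hfu : (decide (u ∉ reach) && decide (u ≠ a)) = false := by simp [hur]
        have hgu : decide (u ∉ reach) = false := by simp [hur]
        rw [List.filter_cons, List.filter_cons, hfu, hgu]
        simpa using ihr
      · have hfu : (decide (u ∉ reach) && decide (u ≠ a)) = true := by simp [hur, hua]
        have hgu : decide (u ∉ reach) = true := by simp [hur]
        rw [List.filter_cons, List.filter_cons, hfu, hgu]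
        simp only [if_true, List.length_cons]
        omega

theorem pvCount (U t reach : List String) (hU : U.Nodup) (ht : t.Nodup)
    (hsub : ∀ x ∈ t, x ∈ U) (hdisj : ∀ x ∈ t, x ∉ reach) :
    (U.filter (fun x => decide (x ∉ reach ++ t))).length + t.length
      = (U.filter (fun x => decide (x ∉ reach))).length := by
  induction t generalizing reach with
  | nil => simp
  | cons a rest ih =>
    rcases List.nodup_cons.1 ht with ⟨hanr, hrest⟩
    have key := pvCount1 U reach a hU (hsub a List.mem_cons_self) (hdisj a List.mem_cons_self)
    have ih' := ih (reach ++ [a]) hrest (fun x hx => hsub x (List.mem_cons_of_mem _ hx))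
      (fun x hx => by
        have hx1 := hdisj x (List.mem_cons_of_mem _ hx)
        have hx2 : x ≠ a := fun h => hanr (h ▸ hx)
        simp [hx1, hx2])
    have e1 : U.filter (fun x => decide (x ∉ reach ++ a :: rest))
        = U.filter (fun x => decide (x ∉ (reach ++ [a]) ++ rest)) := by
      refine List.filter_congr (fun x _ => ?_)
      simp only [decide_eq_decide, List.mem_append, List.mem_cons]
      tauto
    have e2 : U.filter (fun x => decide (x ∉ reach ++ [a]))
        = U.filter (fun x => decide (x ∉ reach) && decide (x ≠ a)) := by
      refine List.filter_congr (fun x _ => ?_)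
      simp [List.mem_append, not_or]
    rw [e1]
    rw [e2] at ih'
    simp only [List.length_cons]
    omega

theorem pvLookup_syms_subset (g : List (String × List String)) (k : String) (prods : List String)
    (h : pvLookup g k = some prods) : ∀ x ∈ pvSyms prods, x ∈ pvU g := by
  intro x hx
  rw [pvU, PySem.Set.mem_ofList, List.mem_flatMap]
  induction g with
  | nil => simp [pvLookup] at h
  | cons kv rest ih =>
    obtain ⟨k', v⟩ := kv
    by_cases hk : k' == k
    · simp only [pvLookup, hk, if_true, Option.some.injEq] at h
      exact ⟨(k', v), List.mem_cons_self, h ▸ hx⟩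
    · simp only [pvLookup, hk, if_false, Bool.false_eq_true] at h
      obtain ⟨kv', h1, h2⟩ := ih h
      exact ⟨kv', List.mem_cons_of_mem _ h1, h2⟩

-- A's while-loop: pop the last worklist element, expand its productions
def pvALoop (g : List (String × List String)) (reach newly : List String) : List String :=
  if hn : newly = [] then reach
  else
    -- 'if current_symbol in grammar_rules: for production in grammar_rules[current_symbol]'
    match hL : pvLookup g (newly.getLast hn) with
    | none => pvALoop g reach newly.dropLast
    | some prods =>
      pvALoop g (pvAdd reach newly.dropLast (pvSyms prods)).1
                (pvAdd reach newly.dropLast (pvSyms prods)).2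
termination_by ((pvU g).filter (fun x => decide (x ∉ reach))).length + newly.length
decreasing_by
  · have := List.length_pos_of_ne_nil hn
    simp [List.length_dropLast]
    omega
  · obtain ⟨t, hst, hnd, hmem⟩ := pvAdd_spec (pvSyms prods) reach newly.dropLast
    rw [hst]
    have hcount := pvCount (pvU g) t reach (PySem.Set.nodup_ofList _) hnd
      (fun x hx => pvLookup_syms_subset g _ prods hL x ((hmem x).1 hx).1)
      (fun x hx => ((hmem x).1 hx).2)
    have := List.length_pos_of_ne_nil hn
    simp only [List.length_append, List.length_dropLast]
    omega

def discardUnreachableProductions (grammar_rules : List (String × List String)) (start_symbol : String) : List (String × List String) :=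
  -- reachable = {start_symbol}; newly_reachable = [start_symbol]; the while loop; then
  -- the filtering dict comprehension over grammar_rules.items()
  let reach := pvALoop grammar_rules [start_symbol] [start_symbol]
  grammar_rules.filter (fun kv => decide (kv.1 ∈ reach))

-- ===== PORT B =====

-- one full pass over the rule table: for key, productions in grammar_rules.items():
--   if key in reachable: for production in productions: reachable.update(production.split())
def pvBPass (g : List (String × List String)) (reach : List String) : List String :=
  g.foldl (fun r kv =>
    if kv.1 ∈ r then kv.2.foldl (fun r2 p => PySem.Set.update r2 (PySem.Str.split₀ p)) r
    else r) reach

def discardUnreachableProductions_alt (grammar_rules : List (String × List String)) (start_symbol : String) : List (String × List String) :=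
  let reach := (List.range grammar_rules.length).foldl (fun r _ => pvBPass grammar_rules r) [start_symbol]
  grammar_rules.filter (fun kv => decide (kv.1 ∈ reach))

-- ===== PRECONDITION & SPEC =====
-- Pre_ excludes association lists with duplicate keys: a Python dict cannot contain them,
-- and on such lists A's first-match dict lookup and B's scan of every entry read
-- different productions (an accidental corner of the List-encoding, not of the Pythons).
def Pre_discardUnreachableProductions (grammar_rules : List (String × List String)) (start_symbol : String) : Prop :=
  (grammar_rules.map Prod.fst).Nodup
instance (grammar_rules : List (String × List String)) (start_symbol : String) : Decidable (Pre_discardUnreachableProductions grammar_rules start_symbol) := by unfold Pre_discardUnreachableProductions; infer_instance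

def pvWitness_discardUnreachableProductions : (List (String × List String)) × String :=
  ([("S", ["A b", "c"]), ("A", ["a"]), ("X", ["y"])], "S")

def Spec_discardUnreachableProductions (grammar_rules : List (String × List String)) (start_symbol : String) (out : List (String × List String)) : Prop := out = discardUnreachableProductions_alt grammar_rules start_symbol
instance (grammar_rules : List (String × List String)) (start_symbol : String) (out : List (String × List String)) : Decidable (Spec_discardUnreachableProductions grammar_rules start_symbol out) := by unfold Spec_discardUnreachableProductions; infer_instance

-- ===== CLAIM (what is proved, stated in full; the proofs are below) =====
def Claim_equal_discardUnreachableProductions : Prop := ∀ (grammar_rules : List (String × List String)) (start_symbol : String), Dom_discardUnreachableProductions grammar_rules start_symbol → Pre_discardUnreachableProductions grammar_rules start_symbol → Spec_discardUnreachableProductions grammar_rules start_symbol (discardUnreachableProductions grammar_rules start_symbol)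

-- ===== LEMMAS AND PROOFS =====

-- reachability closure of a base set of symbols through the grammar's dict lookup
inductive pvCl (g : List (String × List String)) (base : List String) : String → Prop
  | base {x : String} : x ∈ base → pvCl g base x
  | step {k : String} {prods : List String} {p x : String} :
      pvCl g base k → pvLookup g k = some prods → p ∈ prods →
      x ∈ PySem.Str.split₀ p → pvCl g base x

-- R is closed at symbol k
def pvClosedAt (g : List (String × List String)) (k : String) (R : List String) : Prop :=
  ∀ prods, pvLookup g k = some prods → ∀ p ∈ prods, ∀ x ∈ PySem.Str.split₀ p, x ∈ R

theorem pvCl_trans {g : List (String × List String)} {base base' : List String} {x : String}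
    (hb : ∀ y ∈ base, pvCl g base' y) (h : pvCl g base x) : pvCl g base' x := by
  induction h with
  | base hx => exact hb _ hx
  | step _ hl hp hx ih => exact pvCl.step ih hl hp hx

theorem pvALoop_sound (g : List (String × List String)) :
    ∀ reach newly, (∀ x ∈ newly, x ∈ reach) →
      ∀ x ∈ pvALoop g reach newly, pvCl g reach x := by
  intro reach newly
  fun_induction pvALoop g reach newly with
  | case1 reach => exact fun _ x hx => pvCl.base hx
  | case2 reach newly hn _hL ih =>
    intro hinv
    exact ih (fun x hx => hinv x ((List.dropLast_subset newly) hx))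
  | case3 reach newly hn prods hL ih =>
    intro hinv
    obtain ⟨t, hst, hnd, hmem⟩ := pvAdd_spec (pvSyms prods) reach newly.dropLast
    rw [hst] at ih ⊢
    have hbase : ∀ y ∈ reach ++ t, pvCl g reach y := by
      intro y hy
      rcases List.mem_append.1 hy with hy | hy
      · exact pvCl.base hy
      · obtain ⟨hys, -⟩ := (hmem y).1 hy
        have hys' : y ∈ prods.flatMap (fun p => PySem.Str.split₀ p) := hys
        obtain ⟨p, hp, hyp⟩ := List.mem_flatMap.1 hys'
        exact pvCl.step (pvCl.base (hinv _ (List.getLast_mem hn))) hL hp hyp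
    intro x hx
    refine pvCl_trans hbase (ih ?_ x hx)
    intro y hy
    rcases List.mem_append.1 hy with hy | hy
    · exact List.mem_append_left _ (hinv y ((List.dropLast_subset newly) hy))
    · exact List.mem_append_right _ hy

theorem pvALoop_supset (g : List (String × List String)) :
    ∀ reach newly, ∀ x ∈ reach, x ∈ pvALoop g reach newly := by
  intro reach newly
  fun_induction pvALoop g reach newly with
  | case1 reach => exact fun x hx => hx
  | case2 reach newly hn hL ih => exact ih
  | case3 reach newly hn prods hL ih =>
    intro x hx
    obtain ⟨t, hst, -, -⟩ := pvAdd_spec (pvSyms prods) reach newly.dropLast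
    refine ih x ?_
    rw [hst]
    exact List.mem_append_left _ hx

theorem pvALoop_closed (g : List (String × List String)) :
    ∀ reach newly, (∀ k ∈ reach, k ∉ newly → pvClosedAt g k reach) →
      ∀ k ∈ pvALoop g reach newly, pvClosedAt g k (pvALoop g reach newly) := by
  intro reach newly
  fun_induction pvALoop g reach newly with
  | case1 reach => exact fun hinv k hk => hinv k hk (by simp)
  | case2 reach newly hn hL ih =>
    intro hinv
    refine ih ?_
    intro k hk hkn
    by_cases hknew : k ∈ newly
    · have hklast : k = newly.getLast hn := by
        have hsplit := List.dropLast_append_getLast hn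
        rw [← hsplit] at hknew
        rcases List.mem_append.1 hknew with h | h
        · exact absurd h hkn
        · simpa using h
      intro prods hpl
      rw [hklast, hL] at hpl
      cases hpl
    · exact hinv k hk hknew
  | case3 reach newly hn prods hL ih =>
    intro hinv
    obtain ⟨t, hst, hnd, hmem⟩ := pvAdd_spec (pvSyms prods) reach newly.dropLast
    rw [hst] at ih ⊢
    refine ih ?_
    intro k hk hkn
    rcases List.mem_append.1 hk with hkr | hkt
    · by_cases hknew : k ∈ newly
      · have hklast : k = newly.getLast hn := by
          have hsplit := List.dropLast_append_getLast hn
          rw [← hsplit] at hknew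
          rcases List.mem_append.1 hknew with h | h
          · exact absurd (List.mem_append_left _ h) hkn
          · simpa using h
        intro prods' hpl' p hp x hx
        rw [hklast, hL] at hpl'
        injection hpl' with hpe
        subst hpe
        have hxs : x ∈ pvSyms prods := List.mem_flatMap.2 ⟨p, hp, hx⟩
        by_cases hxr : x ∈ reach
        · exact List.mem_append_left _ hxr
        · exact List.mem_append_right _ ((hmem x).2 ⟨hxs, hxr⟩)
      · intro prods' hpl' p hp x hx
        exact List.mem_append_left _ (hinv k hkr hknew prods' hpl' p hp x hx)
    · exact absurd (List.mem_append_right _ hkt) hkn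

theorem pvA_iff (g : List (String × List String)) (s : String) (x : String) :
    x ∈ pvALoop g [s] [s] ↔ pvCl g [s] x := by
  constructor
  · exact fun h => pvALoop_sound g [s] [s] (fun y hy => hy) x h
  · intro h
    have hclosed := pvALoop_closed g [s] [s] (fun k hk hkn => absurd hk hkn)
    induction h with
    | base hx => exact pvALoop_supset g [s] [s] _ hx
    | step hcl hLk hp hx ih => exact hclosed _ ih _ hLk _ hp _ hx

-- ===== B-side lemmas =====

-- the pass's per-entry function, named for the proofs
def pvEntry (r : List String) (kv : String × List String) : List String :=
  if kv.1 ∈ r then kv.2.foldl (fun r2 p => PySem.Set.update r2 (PySem.Str.split₀ p)) r else r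

theorem pvBPass_eq (g : List (String × List String)) (r : List String) :
    pvBPass g r = g.foldl pvEntry r := rfl

theorem pvUpdate_extends (r xs : List String) : ∃ t, PySem.Set.update r xs = r ++ t :=
  ⟨_, PySem.Set.update_eq_append_filter r xs⟩

theorem pvUpdate_of_subset (r xs : List String) (h : ∀ x ∈ xs, x ∈ r) :
    PySem.Set.update r xs = r := by
  rw [PySem.Set.update_eq_append_filter r xs]
  have hnil : (PySem.Set.ofList xs).filter (fun y => !(PySem.Set.contains r y)) = [] := by
    rw [List.filter_eq_nil_iff]
    intro y hy
    have hyx : y ∈ xs := (PySem.Set.mem_ofList _ _).1 hy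
    simpa using h y hyx
  rw [hnil, List.append_nil]

theorem pvInner_fix (r : List String) (prods : List String)
    (h : ∀ p ∈ prods, ∀ x ∈ PySem.Str.split₀ p, x ∈ r) :
    prods.foldl (fun r2 p => PySem.Set.update r2 (PySem.Str.split₀ p)) r = r := by
  induction prods with
  | nil => rfl
  | cons p rest ih =>
    rw [List.foldl_cons, pvUpdate_of_subset r _ (h p List.mem_cons_self)]
    exact ih (fun p' hp' => h p' (List.mem_cons_of_mem _ hp'))

theorem pvLookup_of_mem (g : List (String × List String)) (hnd : (g.map Prod.fst).Nodup)
    {k : String} {v : List String} (hmem : (k, v) ∈ g) : pvLookup g k = some v := by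
  induction g with
  | nil => simp at hmem
  | cons kv rest ih =>
    obtain ⟨k', v'⟩ := kv
    rcases List.mem_cons.1 hmem with heq | hmem'
    · cases heq
      simp [pvLookup]
    · have hk : ¬ (k' = k) := by
        intro h
        subst h
        have hkm : k' ∈ rest.map Prod.fst := List.mem_map.2 ⟨(k', v), hmem', rfl⟩
        exact (List.nodup_cons.1 (by simpa using hnd)).1 hkm
      have hnd' : (rest.map Prod.fst).Nodup := (List.nodup_cons.1 (by simpa using hnd)).2
      simpa [pvLookup, hk] using ih hnd' hmem'

-- membership after the inner production loop
theorem pvInner_mem (prods : List String) (r : List String) (x : String) :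
    x ∈ prods.foldl (fun r2 p => PySem.Set.update r2 (PySem.Str.split₀ p)) r ↔
      x ∈ r ∨ ∃ p ∈ prods, x ∈ PySem.Str.split₀ p := by
  induction prods generalizing r with
  | nil => simp
  | cons p rest ih =>
    rw [List.foldl_cons, ih, PySem.Set.mem_update]
    constructor
    · rintro ((h | h) | ⟨p', hp', hx⟩)
      · exact Or.inl h
      · exact Or.inr ⟨p, List.mem_cons_self, h⟩
      · exact Or.inr ⟨p', List.mem_cons_of_mem _ hp', hx⟩
    · rintro (h | ⟨p', hp', hx⟩)
      · exact Or.inl (Or.inl h)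
      · rcases List.mem_cons.1 hp' with rfl | hp'
        · exact Or.inl (Or.inr hx)
        · exact Or.inr ⟨p', hp', hx⟩

-- every fold step only appends
theorem pvFoldl_extends {β : Type} (f : List String → β → List String)
    (h : ∀ r b, ∃ t, f r b = r ++ t) :
    ∀ (l : List β) (r : List String), ∃ t, l.foldl f r = r ++ t := by
  intro l
  induction l with
  | nil => exact fun r => ⟨[], by simp⟩
  | cons b l ih =>
    intro r
    obtain ⟨t1, h1⟩ := h r b
    obtain ⟨t2, h2⟩ := ih (r ++ t1)
    exact ⟨t1 ++ t2, by simp [List.foldl_cons, h1, h2]⟩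

theorem pvEntry_extends : ∀ (r : List String) (kv : String × List String),
    ∃ t, pvEntry r kv = r ++ t := by
  intro r kv
  unfold pvEntry
  split
  · exact pvFoldl_extends _ (fun r2 p => pvUpdate_extends r2 _) kv.2 r
  · exact ⟨[], by simp⟩

theorem pvBPass_extends (g : List (String × List String)) (r : List String) :
    ∃ t, pvBPass g r = r ++ t := by
  rw [pvBPass_eq]
  exact pvFoldl_extends pvEntry pvEntry_extends g r

theorem pvBAux_sound (g : List (String × List String)) (base : List String)
    (hnd : (g.map Prod.fst).Nodup) :
    ∀ (gl : List (String × List String)), (∀ kv ∈ gl, kv ∈ g) →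
      ∀ r, (∀ y ∈ r, pvCl g base y) → ∀ x ∈ gl.foldl pvEntry r, pvCl g base x := by
  intro gl
  induction gl with
  | nil => exact fun _ r hr x hx => hr x hx
  | cons kv gl ih =>
    intro hsub r hr
    rw [List.foldl_cons]
    refine ih (fun kv' h => hsub kv' (List.mem_cons_of_mem _ h)) (pvEntry r kv) ?_
    intro y hy
    unfold pvEntry at hy
    split at hy
    case isTrue hk =>
      rw [pvInner_mem] at hy
      rcases hy with hy | ⟨p, hp, hyp⟩
      · exact hr y hy
      · have hLk : pvLookup g kv.1 = some kv.2 :=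
          pvLookup_of_mem g hnd (by simpa using hsub kv List.mem_cons_self)
        exact pvCl.step (hr kv.1 hk) hLk hp hyp
    case isFalse => exact hr y hy

theorem pvBPass_sound (g : List (String × List String)) (hnd : (g.map Prod.fst).Nodup)
    (r : List String) : ∀ x ∈ pvBPass g r, pvCl g r x := by
  rw [pvBPass_eq]
  exact pvBAux_sound g r hnd g (fun _ h => h) r (fun y hy => pvCl.base hy)

-- a key already reachable before the pass gets all its production symbols added
theorem pvBPass_processes (g : List (String × List String)) (r : List String)
    {k : String} {prods : List String} (hmem : (k, prods) ∈ g) (hk : k ∈ r) :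
    ∀ p ∈ prods, ∀ x ∈ PySem.Str.split₀ p, x ∈ pvBPass g r := by
  rw [pvBPass_eq]
  suffices haux : ∀ (gl : List (String × List String)) (r : List String)
      (kv : String × List String), kv ∈ gl → kv.1 ∈ r →
      ∀ p ∈ kv.2, ∀ x ∈ PySem.Str.split₀ p, x ∈ gl.foldl pvEntry r by
    exact haux g r (k, prods) hmem hk
  intro gl
  induction gl with
  | nil => intro r kv hkv; simp at hkv
  | cons kv0 gl ih =>
    intro r kv hkv hk p hp x hx
    rw [List.foldl_cons]
    rcases List.mem_cons.1 hkv with rfl | hkv'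
    · obtain ⟨t2, h2⟩ := pvFoldl_extends pvEntry pvEntry_extends gl (pvEntry r kv)
      have hxe : x ∈ pvEntry r kv := by
        unfold pvEntry
        rw [if_pos hk, pvInner_mem]
        exact Or.inr ⟨p, hp, hx⟩
      rw [h2]
      exact List.mem_append_left _ hxe
    · obtain ⟨t1, h1⟩ := pvEntry_extends r kv0
      exact ih (pvEntry r kv0) kv hkv' (h1 ▸ List.mem_append_left _ hk) p hp x hx

theorem pvBPass_of_closed (g : List (String × List String)) (hnd : (g.map Prod.fst).Nodup)
    (r : List String) (hcl : ∀ k ∈ r, pvClosedAt g k r) : pvBPass g r = r := by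
  rw [pvBPass_eq]
  suffices haux : ∀ (gl : List (String × List String)), (∀ kv ∈ gl, kv ∈ g) →
      gl.foldl pvEntry r = r by
    exact haux g (fun _ h => h)
  intro gl
  induction gl with
  | nil => intro _; rfl
  | cons kv gl ih =>
    intro hsub
    have hentry : pvEntry r kv = r := by
      unfold pvEntry
      split
      case isTrue hk =>
        have hLk : pvLookup g kv.1 = some kv.2 :=
          pvLookup_of_mem g hnd (by simpa using hsub kv List.mem_cons_self)
        have hsplits := hcl kv.1 hk kv.2 hLk
        exact pvInner_fix r kv.2 hsplits
      case isFalse => rfl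
    rw [List.foldl_cons, hentry]
    exact ih (fun kv' h => hsub kv' (List.mem_cons_of_mem _ h))

-- iterate form of B's pass loop
def pvIter (g : List (String × List String)) : Nat → List String → List String
  | 0, r => r
  | j + 1, r => pvIter g j (pvBPass g r)

theorem pvIter_eq_foldl (g : List (String × List String)) (n : Nat) (r : List String) :
    (List.range n).foldl (fun r _ => pvBPass g r) r = pvIter g n r := by
  induction n with
  | zero => simp [pvIter]
  | succ n ih =>
    rw [List.range_succ, List.foldl_append, ih]
    simp only [List.foldl_cons, List.foldl_nil]
    have hcomm : ∀ (m : Nat) (r' : List String),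
        pvIter g m (pvBPass g r') = pvBPass g (pvIter g m r') := by
      intro m
      induction m with
      | zero => intro r'; rfl
      | succ m ihm => intro r'; exact ihm (pvBPass g r')
    exact (hcomm n r).symm

theorem pvIter_of_closed (g : List (String × List String)) (hnd : (g.map Prod.fst).Nodup)
    (j : Nat) (r : List String) (hcl : ∀ k ∈ r, pvClosedAt g k r) : pvIter g j r = r := by
  induction j with
  | zero => rfl
  | succ j ih =>
    show pvIter g j (pvBPass g r) = r
    rw [pvBPass_of_closed g hnd r hcl]
    exact ih

theorem pvIter_supset (g : List (String × List String)) (j : Nat) (r : List String) :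
    ∀ x ∈ r, x ∈ pvIter g j r := by
  induction j generalizing r with
  | zero => exact fun x hx => hx
  | succ j ih =>
    intro x hx
    refine ih (pvBPass g r) x ?_
    obtain ⟨t, ht⟩ := pvBPass_extends g r
    rw [ht]
    exact List.mem_append_left _ hx

theorem pvIter_sound (g : List (String × List String)) (hnd : (g.map Prod.fst).Nodup)
    (j : Nat) (r : List String) : ∀ x ∈ pvIter g j r, pvCl g r x := by
  induction j generalizing r with
  | zero => exact fun x hx => pvCl.base hx
  | succ j ih =>
    intro x hx
    exact pvCl_trans (fun y hy => pvBPass_sound g hnd r y hy) (ih (pvBPass g r) x hx)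

theorem pvLookup_mem (g : List (String × List String)) (k : String) (prods : List String)
    (h : pvLookup g k = some prods) : (k, prods) ∈ g := by
  induction g with
  | nil => simp [pvLookup] at h
  | cons kv rest ih =>
    obtain ⟨k', v⟩ := kv
    by_cases hk : k' == k
    · simp only [pvLookup, hk, if_true, Option.some.injEq] at h
      have : k' = k := by simpa using hk
      subst this; subst h
      exact List.mem_cons_self
    · simp only [pvLookup, hk, if_false, Bool.false_eq_true] at h
      exact List.mem_cons_of_mem _ (ih h)

theorem pvLookup_mem_keys (g : List (String × List String)) (k : String) (prods : List String)
    (h : pvLookup g k = some prods) : k ∈ g.map Prod.fst := by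
  exact List.mem_map.2 ⟨(k, prods), pvLookup_mem g k prods h, rfl⟩

theorem pvFilter_mono (K r r' : List String) (h : ∀ x ∈ r, x ∈ r') :
    (K.filter (fun x => decide (x ∈ r))).length ≤ (K.filter (fun x => decide (x ∈ r'))).length := by
  induction K with
  | nil => simp
  | cons u rest ih =>
    rw [List.filter_cons, List.filter_cons]
    by_cases hur : u ∈ r
    · rw [if_pos (by simpa using hur), if_pos (by simpa using h u hur)]
      simpa using ih
    · rw [if_neg (by simpa using hur)]
      split
      · simp only [List.length_cons]; omega
      · exact ih

theorem pvFilter_strict (K r r' : List String) (h : ∀ x ∈ r, x ∈ r')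
    (k : String) (hK : k ∈ K) (hk' : k ∈ r') (hk : k ∉ r) :
    (K.filter (fun x => decide (x ∈ r))).length < (K.filter (fun x => decide (x ∈ r'))).length := by
  induction K with
  | nil => simp at hK
  | cons u rest ih =>
    rw [List.filter_cons, List.filter_cons]
    rcases List.mem_cons.1 hK with rfl | hK'
    · rw [if_neg (by simpa using hk), if_pos (by simpa using hk')]
      have := pvFilter_mono rest r r' h
      simp only [List.length_cons]
      omega
    · have hlt := ih hK'
      by_cases hur : u ∈ r
      · rw [if_pos (by simpa using hur), if_pos (by simpa using h u hur)]
        simpa using hlt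
      · rw [if_neg (by simpa using hur)]
        split
        · simp only [List.length_cons]; omega
        · exact hlt

-- if a pass adds no new KEY, the post-pass set is closed
theorem pvBPass_key_stable_closed (g : List (String × List String)) (r : List String)
    (hkeys : ∀ k ∈ g.map Prod.fst, k ∈ pvBPass g r → k ∈ r) :
    ∀ k ∈ pvBPass g r, pvClosedAt g k (pvBPass g r) := by
  intro k hk prods hpl
  have hkr : k ∈ r := hkeys k (pvLookup_mem_keys g k prods hpl) hk
  exact pvBPass_processes g r (pvLookup_mem g k prods hpl) hkr

-- the main counting induction: enough pass budget forces closure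
theorem pvIter_closed (g : List (String × List String)) (hnd : (g.map Prod.fst).Nodup) :
    ∀ (j : Nat) (r : List String),
      (PySem.Set.ofList (g.map Prod.fst)).length + 1 ≤
        ((PySem.Set.ofList (g.map Prod.fst)).filter (fun x => decide (x ∈ r))).length + j →
      ∀ k ∈ pvIter g j r, pvClosedAt g k (pvIter g j r) := by
  intro j
  induction j with
  | zero =>
    intro r hbound
    have hle : ((PySem.Set.ofList (g.map Prod.fst)).filter (fun x => decide (x ∈ r))).length
        ≤ (PySem.Set.ofList (g.map Prod.fst)).length := List.length_filter_le _ _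
    exact absurd hbound (by omega)
  | succ j ih =>
    intro r hbound
    show ∀ k ∈ pvIter g j (pvBPass g r), pvClosedAt g k (pvIter g j (pvBPass g r))
    by_cases hstab : ∀ k ∈ g.map Prod.fst, k ∈ pvBPass g r → k ∈ r
    · have hcl := pvBPass_key_stable_closed g r hstab
      rw [pvIter_of_closed g hnd j (pvBPass g r) hcl]
      exact hcl
    · push Not at hstab
      obtain ⟨k, hkK, hkp, hkr⟩ := hstab
      have hsubp : ∀ x ∈ r, x ∈ pvBPass g r := by
        obtain ⟨t, hteq⟩ := pvBPass_extends g r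
        rw [hteq]
        exact fun x hx => List.mem_append_left _ hx
      have hstrict := pvFilter_strict (PySem.Set.ofList (g.map Prod.fst)) r (pvBPass g r)
        hsubp k ((PySem.Set.mem_ofList _ _).2 hkK) hkp hkr
      exact ih (pvBPass g r) (by omega)

theorem pvB_iff (g : List (String × List String)) (hnd : (g.map Prod.fst).Nodup)
    (s : String) (x : String) :
    x ∈ pvIter g g.length [s] ↔ pvCl g [s] x := by
  have hKeq : PySem.Set.ofList (g.map Prod.fst) = g.map Prod.fst :=
    PySem.Set.ofList_eq_self_of_nodup _ hnd
  by_cases hs : s ∈ g.map Prod.fst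
  · have hbound : (PySem.Set.ofList (g.map Prod.fst)).length + 1 ≤
        ((PySem.Set.ofList (g.map Prod.fst)).filter (fun x => decide (x ∈ ([s] : List String)))).length
          + g.length := by
      have h1 : (PySem.Set.ofList (g.map Prod.fst)).length = g.length := by
        rw [hKeq, List.length_map]
      have hsK : s ∈ (PySem.Set.ofList (g.map Prod.fst)).filter
          (fun x => decide (x ∈ ([s] : List String))) :=
        List.mem_filter.2 ⟨(PySem.Set.mem_ofList _ _).2 hs, by simp⟩
      have h2 := List.length_pos_of_mem hsK
      omega
    have hclosed := pvIter_closed g hnd g.length [s] hbound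
    constructor
    · exact fun h => pvIter_sound g hnd g.length [s] x h
    · intro h
      induction h with
      | base hx => exact pvIter_supset g g.length [s] _ hx
      | step hcl hLk hp hx ih => exact hclosed _ ih _ hLk _ hp _ hx
  · have hcls : ∀ k ∈ ([s] : List String), pvClosedAt g k [s] := by
      intro k hk prods hpl
      have hkk := pvLookup_mem_keys g k prods hpl
      rw [List.mem_singleton.1 hk] at hkk
      exact absurd hkk hs
    have hR : pvIter g g.length [s] = [s] := pvIter_of_closed g hnd _ [s] hcls
    rw [hR]
    constructor
    · exact fun hx => pvCl.base hx
    · intro h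
      induction h with
      | base hx => exact hx
      | step hcl hLk hp hx ih =>
        have hkk := pvLookup_mem_keys g _ _ hLk
        rw [List.mem_singleton.1 ih] at hkk
        exact absurd hkk hs

-- ===== VERDICT (by name: the statement is the Claim_ definition above) =====
theorem discardUnreachableProductions_spec : Claim_equal_discardUnreachableProductions := by
  intro g s _ hpre
  unfold Spec_discardUnreachableProductions
  unfold discardUnreachableProductions discardUnreachableProductions_alt
  simp only
  rw [pvIter_eq_foldl]
  refine List.filter_congr (fun kv _ => ?_)
  have := pvA_iff g s kv.1
  have := pvB_iff g hpre s kv.1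
  simp only [decide_eq_decide]
  constructor
  · intro h; exact (pvB_iff g hpre s kv.1).2 ((pvA_iff g s kv.1).1 h)
  · intro h; exact (pvA_iff g s kv.1).2 ((pvB_iff g hpre s kv.1).1 h)
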